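-- pv_equiv track=rewrite | github.com/jfcherng/coding-practice | LeetCode/1663-smallest-string-with-a-given-numeric-value.py | getSmallestString_reverse
-- ===== SOURCE A (Python) =====
-- from typing import List
--
-- INT_base_lower = ord("a")
--
-- def getSmallestString_reverse(n: int, k: int) -> str:
--     res: List[int] = [0] * n
--
--     while n:
--         res[n - 1] = min(
--             k - (n - 1),  # assume other LSBs are 1s
--             26,
--         )
--         k -= res[n - 1]
--         n -= 1
--
--     return "".join(map(lambda c: chr(INT_base_lower + c), res))
-- ===== SOURCE B (Python) =====
-- def getSmallestString_reverse(n: int, k: int) -> str: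
--     # closed-form segment construction: j trailing 26s, one transition value, 1s in front
--     j = min(max((k - n) // 25, 0), n)
--     if j == n:
--         return chr(97 + 26) * j
--     v = k - 25 * j - n + 1
--     return "".join(chr(97 + c) for c in [1] * (n - j - 1) + [v] + [26] * j)
-- ===== Notes on version B (the rewrite author's own statement) =====
-- stated objective: faster
-- what changed: Replaces the per-position greedy while-loop (mutating a list back-to-front with a min() each step) by a closed-form segment construction: j = clamp((k-n)//25, 0, n) trailing 26s, one transition value, 1s in front — O(1) arithmetic plus bulk list/string building instead of per-position Python-level loop work.
import Mathlib
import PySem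

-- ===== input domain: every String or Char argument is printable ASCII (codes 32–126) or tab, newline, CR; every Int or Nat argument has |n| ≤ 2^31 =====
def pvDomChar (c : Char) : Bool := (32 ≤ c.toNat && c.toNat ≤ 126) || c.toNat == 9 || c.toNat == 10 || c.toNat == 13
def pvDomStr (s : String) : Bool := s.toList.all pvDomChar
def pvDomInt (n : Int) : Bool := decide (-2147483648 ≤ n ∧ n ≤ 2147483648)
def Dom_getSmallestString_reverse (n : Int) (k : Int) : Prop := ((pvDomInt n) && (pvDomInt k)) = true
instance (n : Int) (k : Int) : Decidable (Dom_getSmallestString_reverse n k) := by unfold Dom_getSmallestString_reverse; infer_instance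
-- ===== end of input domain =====

-- B replaces A's per-position greedy loop by a closed-form segment construction (objective: faster, constant-factor: bulk construction instead of a per-position loop).

-- ===== PORT A =====
-- the while loop: counter n counts down to 0, writing min(k-(n-1),26) at index n-1 each step
def gsrLoopA : Nat → Int → List Int → List Int
  | 0, _, res => res
  | m + 1, k, res =>
      let v := min (k - (m : Int)) 26
      gsrLoopA m (k - v) (res.set m v)

def getSmallestString_reverse (n : Int) (k : Int) : String :=
  let res := gsrLoopA n.toNat k (List.replicate n.toNat 0)
  String.mk (res.map fun c => Char.ofNat (97 + c).toNat)

-- ===== PORT B =====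
def getSmallestString_reverse_alt (n : Int) (k : Int) : String :=
  let j := min (max (PySem.Int.floordiv (k - n) 25) 0) n
  if j = n then String.mk (List.replicate j.toNat (Char.ofNat (97 + 26)))
  else
    let v := k - 25 * j - n + 1
    let vals := List.replicate (n - j - 1).toNat (1 : Int) ++ [v] ++ List.replicate j.toNat 26
    String.mk (vals.map fun c => Char.ofNat (97 + c).toNat)

-- ===== PRECONDITION & SPEC =====
-- Pre_ excludes exactly the inputs where Python A raises: n < 0 (IndexError on res[n-1] of the
-- empty list) and n > 0 with k < n - 98 (chr of a negative code, ValueError).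
def Pre_getSmallestString_reverse (n : Int) (k : Int) : Prop := 0 ≤ n ∧ (n = 0 ∨ n - k ≤ 98)
instance (n : Int) (k : Int) : Decidable (Pre_getSmallestString_reverse n k) := by unfold Pre_getSmallestString_reverse; infer_instance
def pvWitness_getSmallestString_reverse : Int × Int := (3, 27)

def Spec_getSmallestString_reverse (n : Int) (k : Int) (out : String) : Prop := out = getSmallestString_reverse_alt n k
instance (n : Int) (k : Int) (out : String) : Decidable (Spec_getSmallestString_reverse n k out) := by unfold Spec_getSmallestString_reverse; infer_instance

-- ===== CLAIM (what is proved, stated in full; the proofs are below) =====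
def Claim_equal_getSmallestString_reverse : Prop := ∀ (n : Int) (k : Int), Dom_getSmallestString_reverse n k → Pre_getSmallestString_reverse n k → Spec_getSmallestString_reverse n k (getSmallestString_reverse n k)

-- ===== LEMMAS AND PROOFS =====

lemma fdiv25 (a : Int) : a.fdiv 25 = a / 25 := by
  rw [Int.fdiv_eq_ediv]; simp

-- closed-form value list for the first m positions with remaining budget k
def gsrVals (m : Nat) (k : Int) : List Int :=
  let j := min (max ((k - (m : Int)).fdiv 25) 0) (m : Int)
  if j = (m : Int) then List.replicate m 26
  else List.replicate ((m : Int) - j - 1).toNat 1 ++ [k - 25 * j - (m : Int) + 1] ++ List.replicate j.toNat 26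

lemma gsrVals_step (m : Nat) (k : Int) :
    gsrVals (m + 1) k = gsrVals m (k - min (k - (m : Int)) 26) ++ [min (k - (m : Int)) 26] := by
  unfold gsrVals
  simp only [fdiv25, Nat.cast_add, Nat.cast_one]
  by_cases hbig : 26 ≤ k - (m : Int)
  · have hv : min (k - (m : Int)) 26 = 26 := by omega
    rw [hv]
    set q : Int := (k - ((m : Int) + 1)) / 25 with hq
    have hq1 : 1 ≤ q := by omega
    have hq' : (k - 26 - (m : Int)) / 25 = q - 1 := by omega
    rw [hq']
    by_cases hqm : (m : Int) + 1 ≤ q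
    · have h1 : min (max q 0) ((m : Int) + 1) = (m : Int) + 1 := by omega
      have h2 : min (max (q - 1) 0) (m : Int) = (m : Int) := by omega
      rw [h1, h2]
      simp [List.replicate_succ']
    · have h1 : min (max q 0) ((m : Int) + 1) = q := by omega
      have h2 : min (max (q - 1) 0) (m : Int) = q - 1 := by omega
      rw [h1, h2]
      rw [if_neg (by omega), if_neg (by omega)]
      have hc1 : ((m : Int) + 1 - q - 1).toNat = ((m : Int) - (q - 1) - 1).toNat := by omega
      have hc2 : k - 25 * q - ((m : Int) + 1) + 1 = k - 26 - 25 * (q - 1) - (m : Int) + 1 := by ring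
      have hc3 : q.toNat = (q - 1).toNat + 1 := by omega
      rw [hc1, hc2, hc3, List.replicate_succ']
      simp [List.append_assoc]
  · have hv : min (k - (m : Int)) 26 = k - (m : Int) := by omega
    rw [hv]
    have hq1 : min (max ((k - ((m : Int) + 1)) / 25) 0) ((m : Int) + 1) = 0 := by omega
    rw [hq1, if_neg (by omega)]
    have hkk : k - (k - (m : Int)) = (m : Int) := by ring
    rw [hkk]
    have hq0 : min (max (((m : Int) - (m : Int)) / 25) 0) (m : Int) = 0 := by omega
    rw [hq0]
    by_cases hm : (m : Int) = 0
    · rw [if_pos hm.symm]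
      have : m = 0 := by omega
      subst this
      simp
    · rw [if_neg (by omega)]
      have hc1 : ((m : Int) + 1 - 0 - 1).toNat = ((m : Int) - 0 - 1).toNat + 1 := by omega
      have hc2 : (m : Int) - 25 * 0 - (m : Int) + 1 = 1 := by ring
      have hc3 : k - 25 * 0 - ((m : Int) + 1) + 1 = k - (m : Int) := by ring
      rw [hc1, hc2, hc3, List.replicate_succ']
      simp [List.append_assoc]

lemma gsrLoop_eq (m : Nat) : ∀ (k : Int) (rest : List Int),
    gsrLoopA m k (List.replicate m 0 ++ rest) = gsrVals m k ++ rest := by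
  induction m with
  | zero => intro k rest; simp [gsrLoopA, gsrVals]
  | succ m ih =>
      intro k rest
      have hset : (List.replicate (m + 1) (0 : Int) ++ rest).set m (min (k - (m : Int)) 26)
          = List.replicate m 0 ++ (min (k - (m : Int)) 26 :: rest) := by
        have : List.replicate (m + 1) (0 : Int) ++ rest
            = List.replicate m 0 ++ ((0 : Int) :: rest) := by
          simp [List.replicate_succ' (n := m)]
        rw [this, List.set_append_right _ _ (by simp), List.length_replicate]
        simp
      simp only [gsrLoopA, hset]
      rw [ih, gsrVals_step]
      simp

-- ===== VERDICT (by name: the statement is the Claim_ definition above) =====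
theorem getSmallestString_reverse_spec : Claim_equal_getSmallestString_reverse := by
  intro n k _ hpre
  have hn0 : 0 ≤ n := hpre.1
  have hnt : ((n.toNat : Int)) = n := Int.toNat_of_nonneg hn0
  unfold Spec_getSmallestString_reverse getSmallestString_reverse getSmallestString_reverse_alt
  have hL : gsrLoopA n.toNat k (List.replicate n.toNat 0) = gsrVals n.toNat k := by
    simpa using gsrLoop_eq n.toNat k []
  rw [hL]
  unfold gsrVals
  rw [PySem.Int.floordiv_eq_ediv_of_pos (by norm_num)]
  simp only [fdiv25, hnt]
  by_cases hcase : min (max ((k - n) / 25) 0) n = n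
  · simp [hcase, List.map_replicate]
  · simp only [if_neg hcase, List.map_append, List.map_replicate]
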